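-- pv_equiv track=rewrite | github.com/wooly18/Klotski-Solver | klotski.py | solution_len
-- ===== SOURCE A (Python) =====
-- def solution_len(steps):
--     prev_action = None
--     i = 1
--     for board, action in steps:
--         if prev_action != action:
--             prev_action = action
--             i += 1
--     return i
-- ===== SOURCE B (Python) =====
-- def solution_len(steps):
--     actions = [action for _, action in steps]
--
--     def runs(lo, hi):
--         # number of maximal runs of equal actions in actions[lo:hi]
--         if hi - lo <= 1:
--             return hi - lo
--         mid = (lo + hi) // 2
--         r = runs(lo, mid) + runs(mid, hi)
--         if actions[mid - 1] == actions[mid]: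
--             r -= 1
--         return r
--
--     return 1 + runs(0, len(actions))
-- ===== Notes on version B (the rewrite author's own statement) =====
-- stated objective: alternative
-- what changed: Replaces A's stateful left-to-right prev-action scan by a divide-and-conquer run counter: recursively count maximal runs in each half and merge, subtracting one when the run spans the midpoint; result is 1 + number of runs.
import Mathlib
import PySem

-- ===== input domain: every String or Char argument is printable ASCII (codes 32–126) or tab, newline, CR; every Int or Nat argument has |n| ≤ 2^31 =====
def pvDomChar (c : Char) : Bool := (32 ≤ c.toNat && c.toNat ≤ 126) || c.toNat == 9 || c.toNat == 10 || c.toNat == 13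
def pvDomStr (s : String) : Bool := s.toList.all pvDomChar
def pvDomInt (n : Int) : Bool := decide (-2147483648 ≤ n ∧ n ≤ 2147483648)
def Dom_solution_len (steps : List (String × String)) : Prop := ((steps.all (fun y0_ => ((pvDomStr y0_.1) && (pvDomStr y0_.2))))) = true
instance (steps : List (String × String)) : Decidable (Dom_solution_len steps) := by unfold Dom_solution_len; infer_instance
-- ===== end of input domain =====

-- B replaces A's stateful left-to-right scan by a divide-and-conquer run counter
-- (alternative decomposition, same asymptotic cost).

-- ===== PORT A =====
-- literal port of A's loop: state (prev_action, i), branch updates both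
def solution_len (steps : List (String × String)) : Int :=
  (steps.foldl
    (fun (st : Option String × Int) ba =>
      if st.1 ≠ some ba.2 then (some ba.2, st.2 + 1) else st)
    (none, 1)).2

-- ===== PORT B =====
-- literal port of B's recursive helper `runs(lo, hi)`: counts maximal runs of equal
-- actions in actions[lo:hi] by halving; indexing actions[mid-1], actions[mid] is always
-- in range in B's calls, ported as the (equal) Option-valued lookups
def pvRunsDC (actions : List String) (lo hi : Nat) : Int :=
  if hi - lo ≤ 1 then (hi : Int) - (lo : Int)
  else
    let mid := (lo + hi) / 2
    let r := pvRunsDC actions lo mid + pvRunsDC actions mid hi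
    if actions[mid - 1]? = actions[mid]? then r - 1 else r
termination_by hi - lo
decreasing_by all_goals omega

def solution_len_alt (steps : List (String × String)) : Int :=
  let actions := steps.map (fun ba => ba.2)
  1 + pvRunsDC actions 0 actions.length

-- ===== PRECONDITION & SPEC =====
def Spec_solution_len (steps : List (String × String)) (out : Int) : Prop := out = solution_len_alt steps
instance (steps : List (String × String)) (out : Int) : Decidable (Spec_solution_len steps out) := by unfold Spec_solution_len; infer_instance

-- ===== CLAIM (what is proved, stated in full; the proofs are below) =====
def Claim_equal_solution_len : Prop := ∀ (steps : List (String × String)), Dom_solution_len steps → Spec_solution_len steps (solution_len steps)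

-- ===== LEMMAS AND PROOFS =====

-- run count of a list given the previous action
def pvRuns (prev : Option String) : List String → Int
  | [] => 0
  | a :: rest => (if prev ≠ some a then 1 else 0) + pvRuns (some a) rest

theorem pvA_eq (steps : List (String × String)) :
    ∀ (prev : Option String) (i : Int),
    (steps.foldl
      (fun (st : Option String × Int) ba =>
        if st.1 ≠ some ba.2 then (some ba.2, st.2 + 1) else st)
      (prev, i)).2 = i + pvRuns prev (steps.map (fun ba => ba.2)) := by
  induction steps with
  | nil => intro prev i; simp [pvRuns]
  | cons ba rest ih =>
      intro prev i
      rw [List.foldl_cons]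
      by_cases h : prev = some ba.2
      · have hstep : (if prev ≠ some ba.2 then (some ba.2, i + 1) else (prev, i)) = (some ba.2, i) := by
          simp [h]
        rw [hstep, ih]; simp [pvRuns, h]
      · have hstep : (if prev ≠ some ba.2 then (some ba.2, i + 1) else (prev, i)) = (some ba.2, i + 1) := by
          simp [h]
        rw [hstep, ih]; simp [pvRuns, h]; ring

theorem pvRuns_append (xs ys : List String) :
    ∀ prev, pvRuns prev (xs ++ ys) = pvRuns prev xs + pvRuns (xs.getLast?.or prev) ys := by
  induction xs with
  | nil => intro prev; simp [pvRuns, Option.or]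
  | cons a rest ih =>
      intro prev
      simp only [List.cons_append, pvRuns, ih (some a)]
      have : (a :: rest).getLast? = (rest.getLast?).or (some a) := by
        cases rest with
        | nil => simp
        | cons b t => simp [List.getLast?_cons_cons]; cases h : (b :: t).getLast? <;> simp_all [Option.or]
      rw [this]
      cases h : rest.getLast? <;> simp [Option.or] <;> ring

theorem pvRuns_shift (x : String) (ys : List String) :
    pvRuns (some x) ys = pvRuns none ys - (if ys.head? = some x then 1 else 0) := by
  cases ys with
  | nil => simp [pvRuns]
  | cons a t =>
      simp only [pvRuns, List.head?_cons]
      by_cases h : a = x <;> simp [h, Ne.symm]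

theorem pvDC_eq (actions : List String) :
    ∀ (n lo hi : Nat), hi - lo ≤ n → lo ≤ hi → hi ≤ actions.length →
      pvRunsDC actions lo hi = pvRuns none ((actions.drop lo).take (hi - lo)) := by
  intro n
  induction n with
  | zero =>
      intro lo hi h1 h2 _
      have : hi = lo := by omega
      subst this
      rw [pvRunsDC]
      simp [pvRuns]
  | succ n ih =>
      intro lo hi h1 h2 h3
      rw [pvRunsDC]
      by_cases hb : hi - lo ≤ 1
      · simp only [if_pos hb]
        rcases Nat.eq_or_lt_of_le h2 with heq | hlt
        · subst heq; simp [pvRuns]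
        · have hhi : hi = lo + 1 := by omega
          subst hhi
          have hlo : lo < actions.length := by omega
          have : (actions.drop lo).take 1 = [actions[lo]] := by
            rw [List.take_one, List.head?_drop, List.getElem?_eq_getElem hlo]
            rfl
          simp [this, pvRuns]
      · simp only [if_neg hb]
        have hlo2 : lo + 2 ≤ hi := by omega
        set mid := (lo + hi) / 2 with hmid
        have hm1 : lo < mid := by omega
        have hm2 : mid < hi := by omega
        have e1 : pvRunsDC actions lo mid = pvRuns none ((actions.drop lo).take (mid - lo)) :=
          ih lo mid (by omega) (by omega) (by omega)
        have e2 : pvRunsDC actions mid hi = pvRuns none ((actions.drop mid).take (hi - mid)) :=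
          ih mid hi (by omega) (by omega) (by omega)
        -- split the slice at mid
        have hsplit : (actions.drop lo).take (hi - lo)
            = (actions.drop lo).take (mid - lo) ++ (actions.drop mid).take (hi - mid) := by
          have h4 : hi - lo = (mid - lo) + (hi - mid) := by omega
          rw [h4, List.take_add, List.drop_drop]
          have h5 : lo + (mid - lo) = mid := by omega
          rw [h5]
        -- identify the boundary elements
        have hlenL : ((actions.drop lo).take (mid - lo)).length = mid - lo := by
          simp; omega
        have hlast : ((actions.drop lo).take (mid - lo)).getLast? = actions[mid - 1]? := by
          rw [List.getLast?_eq_getElem?, hlenL]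
          rw [List.getElem?_take_of_lt (by omega), List.getElem?_drop]
          congr 1; omega
        have hhead : ((actions.drop mid).take (hi - mid)).head? = actions[mid]? := by
          rw [List.head?_take, List.head?_drop]
          simp only [if_neg (by omega : ¬ (hi - mid = 0))]
        have hmem : mid - 1 < actions.length := by omega
        have hmem2 : mid < actions.length := by omega
        rw [e1, e2, hsplit, pvRuns_append, hlast, List.getElem?_eq_getElem hmem,
            Option.some_or, pvRuns_shift, hhead, List.getElem?_eq_getElem hmem2]
        by_cases he : actions[mid - 1] = actions[mid]
        · rw [if_pos (by simp [he]), if_pos (by simp [he])]; ring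
        · rw [if_neg (by simp [he]), if_neg (by simp [Ne.symm he])]; ring

-- ===== VERDICT (by name: the statement is the Claim_ definition above) =====
theorem solution_len_spec : Claim_equal_solution_len := by
  intro steps _
  unfold Spec_solution_len solution_len solution_len_alt
  rw [pvA_eq]
  show _ = 1 + _
  rw [pvDC_eq _ ((steps.map (fun ba => ba.2)).length) 0 _ (by omega) (by omega) (le_refl _)]
  simp only [List.drop_zero, Nat.sub_zero, List.take_length]
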